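-- pv_equiv track=rewrite | github.com/jramaswami/Binary_Search_Python | odd_longest_increasing_subsequence.py | solve
-- ===== SOURCE A (Python) =====
-- import collections
--
-- def solve(nums, k):
--     dp = [collections.defaultdict(int) for _ in nums]
--     soln = 0
--     for i, n in enumerate(nums):
--         odd = n % 2
--         # You can always have this as our subsequence.
--         dp[i][odd] = max(dp[i][odd], 1)
--         if odd >= k:
--             soln = max(soln, dp[i][odd])
--         for j, m in enumerate(nums[:i]):
--             if m < n:
--                 for p in dp[j]:
--                     dp[i][p+odd] = max(dp[i][p+odd], dp[j][p] + 1)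
--                     if p+odd >= k:
--                         soln =  max(soln, dp[i][p+odd])
--     return soln
-- ===== SOURCE B (Python) =====
-- def solve(nums, k):
--     n = len(nums)
--     lo = max(k, 0)
--     best = 0
--     prev = [0] * n  # layer p-1: longest incr. subsequence ending at j with exactly p-1 odd elements (0 = impossible)
--     for p in range(n + 1):
--         cur = []
--         for x in nums:
--             par = x % 2
--             i = len(cur)
--             src = cur if par == 0 else prev[:i]
--             b = 1 if p == par else 0
--             for y, s in zip(nums, src):
--                 if y < x and s > 0 and s + 1 > b:
--                     b = s + 1
--             cur.append(b)
--         if p >= lo: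
--             for b in cur:
--                 if b > best:
--                     best = b
--         prev = cur
--     return best
-- ===== Notes on version B (the rewrite author's own statement) =====
-- stated objective: alternative
-- what changed: replaces A's per-index dict-of-odd-counts DP (for each i, scan all j<i and iterate the keys of dp[j]) by a layered bottom-up DP: for each odd-count layer p one flat array of LIS-lengths is filled from the previous layer, so no dicts and no key iteration remain
import Mathlib
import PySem

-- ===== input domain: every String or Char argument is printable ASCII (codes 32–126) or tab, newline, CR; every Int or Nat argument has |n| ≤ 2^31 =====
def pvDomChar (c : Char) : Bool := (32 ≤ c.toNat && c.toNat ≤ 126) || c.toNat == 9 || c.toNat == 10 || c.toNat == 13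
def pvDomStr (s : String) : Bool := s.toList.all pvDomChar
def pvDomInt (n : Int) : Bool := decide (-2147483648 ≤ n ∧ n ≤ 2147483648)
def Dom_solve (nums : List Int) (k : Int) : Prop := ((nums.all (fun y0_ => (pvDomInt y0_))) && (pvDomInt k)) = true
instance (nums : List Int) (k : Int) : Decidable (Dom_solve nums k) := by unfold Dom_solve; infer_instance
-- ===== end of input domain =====

-- B replaces A's per-index dict-of-odd-count DP (dict iteration inside a quadratic scan) by a
-- layered bottom-up DP: one flat array per odd-count layer, filled layer by layer (objective: alternative).

-- ===== PORT A =====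
def solve (nums : List Int) (k : Int) : Int :=
  -- dp = [collections.defaultdict(int) for _ in nums]
  let dp0 : List (PySem.Dict Int Int) := nums.map (fun _ => PySem.Dict.empty)
  let st := (PySem.List.enumerate nums).foldl (fun (st : List (PySem.Dict Int Int) × Int) en =>
    let dp := st.1
    let soln := st.2
    let i := en.1
    let n := en.2
    let odd := PySem.Int.mod n 2
    -- dp[i][odd] = max(dp[i][odd], 1)   (i from enumerate is ≥ 0, so .toNat is exact)
    let di := dp.getD i.toNat PySem.Dict.empty
    let di := di.insert odd (max (di.getD odd 0) 1)
    let dp := dp.set i.toNat di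
    -- if odd >= k: soln = max(soln, dp[i][odd])
    let soln := if odd ≥ k then max soln ((dp.getD i.toNat PySem.Dict.empty).getD odd 0) else soln
    -- for j, m in enumerate(nums[:i]):
    (PySem.List.enumerate (PySem.List.slice nums none (some i))).foldl
      (fun (st : List (PySem.Dict Int Int) × Int) em =>
        let dp := st.1
        let soln := st.2
        let j := em.1
        let m := em.2
        if m < n then
          -- for p in dp[j]:  (iterates the keys of dp[j]; dp[j] is not modified, j < i)
          ((dp.getD j.toNat PySem.Dict.empty).keys).foldl
            (fun (st : List (PySem.Dict Int Int) × Int) p =>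
              let dp := st.1
              let soln := st.2
              -- dp[i][p+odd] = max(dp[i][p+odd], dp[j][p] + 1)
              let v := (dp.getD j.toNat PySem.Dict.empty).getD p 0
              let di := dp.getD i.toNat PySem.Dict.empty
              let di := di.insert (p + odd) (max (di.getD (p + odd) 0) (v + 1))
              let dp := dp.set i.toNat di
              -- if p+odd >= k: soln = max(soln, dp[i][p+odd])
              let soln := if p + odd ≥ k then
                  max soln ((dp.getD i.toNat PySem.Dict.empty).getD (p + odd) 0)
                else soln
              (dp, soln)) (dp, soln)
        else (dp, soln)) (dp, soln)) (dp0, 0)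
  st.2

-- ===== PORT B =====
def solve_alt (nums : List Int) (k : Int) : Int :=
  let n := nums.length
  let lo := max k 0
  let st := (PySem.List.pyRange 0 ((n : Int) + 1) 1).foldl (fun (st : List Int × Int) p =>
    let prev := st.1
    let best := st.2
    let cur := nums.foldl (fun (cur : List Int) x =>
      let par := PySem.Int.mod x 2
      let i := cur.length
      let src := if par == 0 then cur else prev.take i   -- prev[:i] with 0 ≤ i ≤ len(prev): exact
      let b : Int := if p == par then 1 else 0
      let b := (nums.zip src).foldl (fun b ys =>
        if ys.1 < x ∧ ys.2 > 0 ∧ ys.2 + 1 > b then ys.2 + 1 else b) b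
      cur ++ [b]) []
    let best := if p ≥ lo then cur.foldl (fun best b => if b > best then b else best) best else best
    (cur, best)) (List.replicate n 0, 0)
  st.2

-- ===== PRECONDITION & SPEC =====
def Spec_solve (nums : List Int) (k : Int) (out : Int) : Prop := out = solve_alt nums k
instance (nums : List Int) (k : Int) (out : Int) : Decidable (Spec_solve nums k out) := by unfold Spec_solve; infer_instance

-- ===== CLAIM (what is proved, stated in full; the proofs are below) =====
def Claim_equal_solve : Prop := ∀ (nums : List Int) (k : Int), Dom_solve nums k → Spec_solve nums k (solve nums k)

-- ===== LEMMAS AND PROOFS =====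

-- parity (Python n % 2) of the element at index i
def pvPar (nums : List Int) (i : Nat) : Int := PySem.Int.mod (nums.getD i 0) 2

-- one LIS-transition step: extend the best-so-far b by a predecessor j carrying value s
def pvStep (nums : List Int) (i : Nat) (b : Int) (j : Nat) (s : Int) : Int :=
  if nums.getD j 0 < nums.getD i 0 ∧ 0 < s ∧ b < s + 1 then s + 1 else b

-- pvF nums i p: length of the longest strictly increasing subsequence of nums ending at index i
-- with exactly p odd elements (0 = no such subsequence); the common spec of both DPs
def pvF (nums : List Int) (i : Nat) (p : Int) : Int :=
  (List.range i).attach.foldl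
    (fun b j => pvStep nums i b j.1 (pvF nums j.1 (p - pvPar nums i)))
    (if p = pvPar nums i then 1 else 0)
termination_by i
decreasing_by exact List.mem_range.mp j.2

-- partial version: transitions restricted to predecessors j < t
def pvG (nums : List Int) (i t : Nat) (p : Int) : Int :=
  (List.range t).foldl
    (fun b j => pvStep nums i b j (pvF nums j (p - pvPar nums i)))
    (if p = pvPar nums i then 1 else 0)

theorem pvF_eq (nums : List Int) (i : Nat) (p : Int) : pvF nums i p = pvG nums i i p := by
  rw [pvF, pvG]
  exact List.foldl_attach (l := List.range i)
    (f := fun b j => pvStep nums i b j (pvF nums j (p - pvPar nums i)))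
    (b := (if p = pvPar nums i then 1 else 0))

theorem pvPar_mem (nums : List Int) (i : Nat) : pvPar nums i = 0 ∨ pvPar nums i = 1 := by
  have h1 := PySem.Int.mod_nonneg (nums.getD i 0) (by omega : (0:Int) < 2)
  have h2 := PySem.Int.mod_lt (nums.getD i 0) (by omega : (0:Int) < 2)
  unfold pvPar
  omega

theorem pvG_succ (nums : List Int) (i t : Nat) (p : Int) :
    pvG nums i (t + 1) p = pvStep nums i (pvG nums i t p) t (pvF nums t (p - pvPar nums i)) := by
  rw [pvG, pvG, List.range_succ, List.foldl_append]
  rfl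

theorem pvG_nonneg (nums : List Int) (i t : Nat) (p : Int) : 0 ≤ pvG nums i t p := by
  induction t with
  | zero =>
    unfold pvG
    simp only [List.range_zero, List.foldl_nil]
    split <;> omega
  | succ t ih =>
    rw [pvG_succ]
    unfold pvStep
    split <;> omega

theorem pvF_nonneg (nums : List Int) (i : Nat) (p : Int) : 0 ≤ pvF nums i p := by
  rw [pvF_eq]; exact pvG_nonneg nums i i p

theorem pvF_pos_bounds (nums : List Int) (i : Nat) (p : Int) (h : 0 < pvF nums i p) :
    0 ≤ p ∧ p ≤ (i : Int) + 1 := by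
  induction i using Nat.strong_induction_on generalizing p with
  | _ i ih =>
    rw [pvF_eq] at h
    have aux : ∀ t, t ≤ i → 0 < pvG nums i t p → 0 ≤ p ∧ p ≤ (i : Int) + 1 := by
      intro t ht h
      induction t with
      | zero =>
        unfold pvG at h
        simp only [List.range_zero, List.foldl_nil] at h
        have hpb := pvPar_mem nums i
        split at h
        · rename_i hpe
          constructor <;> omega
        · omega
      | succ t iht =>
        rw [pvG_succ] at h
        unfold pvStep at h
        split at h
        · rename_i hc
          have hb := ih t (by omega) _ hc.2.1
          rcases pvPar_mem nums i with hp | hp <;> omega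
        · exact iht (by omega) h
    exact aux i le_rfl h

theorem pvF_of_neg (nums : List Int) (i : Nat) (p : Int) (h : p < 0) : pvF nums i p = 0 := by
  rcases Int.lt_or_le 0 (pvF nums i p) with hp | hp
  · exact absurd (pvF_pos_bounds nums i p hp).1 (by omega)
  · have := pvF_nonneg nums i p; omega

-- ---------- conditional-max folds ----------

-- max of (f x) over x ∈ l, seeded with a
def pvCmax {α : Type} (l : List α) (f : α → Int) (a : Int) : Int :=
  l.foldl (fun a x => max a (f x)) a

theorem pvCmax_le_iff {α : Type} (l : List α) (f : α → Int) (a c : Int) :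
    pvCmax l f a ≤ c ↔ a ≤ c ∧ ∀ x ∈ l, f x ≤ c := by
  induction l generalizing a with
  | nil => simp [pvCmax]
  | cons x xs ih =>
    rw [show pvCmax (x :: xs) f a = pvCmax xs f (max a (f x)) from rfl, ih]
    simp only [List.mem_cons]
    constructor
    · rintro ⟨h1, h2⟩
      refine ⟨by omega, fun y hy => ?_⟩
      rcases hy with rfl | hy
      · omega
      · exact h2 y hy
    · rintro ⟨h1, h2⟩
      refine ⟨?_, fun y hy => h2 y (Or.inr hy)⟩
      have := h2 x (Or.inl rfl); omega

theorem pvCmax_congr {α : Type} (l : List α) (f f' : α → Int) (a : Int)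
    (h : ∀ x ∈ l, f x = f' x) : pvCmax l f a = pvCmax l f' a := by
  induction l generalizing a with
  | nil => rfl
  | cons x xs ih =>
    rw [show pvCmax (x :: xs) f a = pvCmax xs f (max a (f x)) from rfl,
      show pvCmax (x :: xs) f' a = pvCmax xs f' (max a (f' x)) from rfl,
      h x (List.mem_cons_self ..), ih _ (fun y hy => h y (List.mem_cons_of_mem _ hy))]

theorem pvCmax_base_le {α : Type} (l : List α) (f : α → Int) (a : Int) : a ≤ pvCmax l f a :=
  ((pvCmax_le_iff l f a (pvCmax l f a)).mp le_rfl).1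

theorem pvCmax_le_of_mem {α : Type} (l : List α) (f : α → Int) (a : Int) {x : α} (hx : x ∈ l) :
    f x ≤ pvCmax l f a :=
  ((pvCmax_le_iff l f a (pvCmax l f a)).mp le_rfl).2 x hx

theorem pvCmax_max_seed {α : Type} (l : List α) (f : α → Int) (a b : Int) :
    pvCmax l f (max a b) = max a (pvCmax l f b) := by
  induction l generalizing b with
  | nil => rfl
  | cons x xs ih =>
    rw [show pvCmax (x :: xs) f (max a b) = pvCmax xs f (max (max a b) (f x)) from rfl,
      show pvCmax (x :: xs) f b = pvCmax xs f (max b (f x)) from rfl,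
      show max (max a b) (f x) = max a (max b (f x)) by omega, ih]

theorem pvCmax_seed {α : Type} (l : List α) (f : α → Int) (a : Int) (ha : 0 ≤ a) :
    pvCmax l f a = max a (pvCmax l f 0) := by
  rw [show a = max a 0 by omega, pvCmax_max_seed]
  omega

theorem pvCmax_append_singleton {α : Type} (l : List α) (x : α) (f : α → Int) (a : Int) :
    pvCmax (l ++ [x]) f a = max (pvCmax l f a) (f x) := by
  unfold pvCmax
  rw [List.foldl_append]
  rfl

theorem pvZip (l : List Int) (t : Nat) (f : Nat → Int) (ht : t ≤ l.length) :
    l.zip ((List.range t).map f) = (List.range t).map (fun j => (l.getD j 0, f j)) := by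
  apply List.ext_getElem
  · simp; omega
  · intro j h1 h2
    have hj : j < t := by simpa using h2
    have hjl : j < l.length := by omega
    simp only [List.getElem_zip, List.getElem_map, List.getElem_range]
    rw [List.getD_eq_getElem l 0 hjl]

-- ---------- the guarded maximum over all (index, odd-count) pairs ----------

-- max over q ∈ [0, R) with k ≤ q of g q  (A's soln bookkeeping for one index)
def pvMx (k : Int) (R : Nat) (g : Int → Int) : Int :=
  pvCmax (List.range R) (fun q => if k ≤ (q : Int) then g (q : Int) else 0) 0

theorem pvMx_nonneg (k : Int) (R : Nat) (g : Int → Int) : 0 ≤ pvMx k R g :=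
  pvCmax_base_le _ _ 0

theorem pvMx_update (k : Int) (R : Nat) (g : Int → Int) (q v : Int)
    (hq0 : 0 ≤ q) (hqR : q < (R : Int)) (hgv : g q ≤ v) :
    pvMx k R (fun r => if r = q then v else g r)
      = if k ≤ q then max (pvMx k R g) v else pvMx k R g := by
  by_cases hk : k ≤ q
  · rw [if_pos hk]
    apply le_antisymm
    · rw [pvMx, pvCmax_le_iff]
      refine ⟨by have := pvMx_nonneg k R g; omega, fun x hx => ?_⟩
      by_cases hg1 : k ≤ (x : Int)
      · rw [if_pos hg1]
        by_cases hxq : (x : Int) = q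
        · rw [if_pos hxq]; omega
        · rw [if_neg hxq]
          have : (fun q' => if k ≤ (q' : Int) then g (q' : Int) else 0) x ≤ pvMx k R g :=
            pvCmax_le_of_mem _ _ _ hx
          simp only [if_pos hg1] at this
          omega
      · rw [if_neg hg1]
        have := pvMx_nonneg k R g; omega
    · have h1 : pvMx k R g ≤ pvMx k R (fun r => if r = q then v else g r) := by
        rw [pvMx, pvCmax_le_iff]
        refine ⟨pvMx_nonneg .., fun x hx => ?_⟩
        have hmem : (fun q' => if k ≤ (q' : Int) then (if (q' : Int) = q then v else g (q' : Int)) else 0) x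
            ≤ pvMx k R (fun r => if r = q then v else g r) := pvCmax_le_of_mem _ _ _ hx
        by_cases hg1 : k ≤ (x : Int)
        · rw [if_pos hg1]
          simp only [if_pos hg1] at hmem
          by_cases hxq : (x : Int) = q
          · rw [if_pos hxq] at hmem; rw [hxq]; omega
          · rw [if_neg hxq] at hmem; omega
        · rw [if_neg hg1]; have := pvMx_nonneg k R (fun r => if r = q then v else g r); omega
      have h2 : v ≤ pvMx k R (fun r => if r = q then v else g r) := by
        have hmemr : q.toNat ∈ List.range R := List.mem_range.mpr (by omega)
        have hmem := pvCmax_le_of_mem (List.range R)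
          (fun q' => if k ≤ (q' : Int) then (if (q' : Int) = q then v else g (q' : Int)) else 0) 0 hmemr
        have hq' : ((q.toNat : Nat) : Int) = q := by omega
        simp only [hq', if_pos hk] at hmem
        exact hmem
      omega
  · rw [if_neg hk]
    apply pvCmax_congr
    intro x _
    by_cases hg1 : k ≤ (x : Int)
    · have : ¬ (x : Int) = q := by omega
      simp only [if_pos hg1, if_neg this]
    · simp only [if_neg hg1]

-- ---------- dict invariant ----------

-- the dict at index j represents the function g (read through getD _ 0, keys ↔ positive)
def pvDFun (d : PySem.Dict Int Int) (g : Int → Int) : Prop :=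
  (∀ q : Int, d.getD q 0 = g q) ∧ (∀ q : Int, d.contains q = true ↔ 0 < g q)

-- ---------- A-side: accumulated solution spec ----------

def pvS (nums : List Int) (k : Int) (t : Nat) : Int :=
  pvCmax (List.range t) (fun i => pvMx k (nums.length + 1) (pvF nums i)) 0

-- ---------- B-side: layered best spec ----------

def pvT (nums : List Int) (p : Int) : Int :=
  pvCmax (List.range nums.length) (fun j => pvF nums j p) 0

def pvB (nums : List Int) (k : Int) (P : Nat) : Int :=
  pvCmax (List.range P) (fun p => if max k 0 ≤ (p : Int) then pvT nums (p : Int) else 0) 0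

-- ---------- the two final maxima agree ----------

theorem pvS_eq_pvB (nums : List Int) (k : Int) :
    pvS nums k nums.length = pvB nums k (nums.length + 1) := by
  apply le_antisymm
  · rw [pvS, pvCmax_le_iff]
    refine ⟨pvCmax_base_le .., fun i hi => ?_⟩
    rw [pvMx, pvCmax_le_iff]
    refine ⟨pvCmax_base_le .., fun q hq => ?_⟩
    by_cases hg : k ≤ (q : Int)
    · rw [if_pos hg]
      have h1 : pvF nums i (q : Int) ≤ pvT nums (q : Int) := pvCmax_le_of_mem _ _ _ hi
      have h2 : (fun p => if max k 0 ≤ (p : Int) then pvT nums (p : Int) else 0) q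
          ≤ pvB nums k (nums.length + 1) := pvCmax_le_of_mem _ _ _ hq
      simp only [if_pos (show max k 0 ≤ (q:Int) by omega)] at h2
      omega
    · rw [if_neg hg]
      exact pvCmax_base_le ..
  · rw [pvB, pvCmax_le_iff]
    refine ⟨pvCmax_base_le .., fun q hq => ?_⟩
    by_cases hg : max k 0 ≤ (q : Int)
    · rw [if_pos hg]
      rw [pvT, pvCmax_le_iff]
      refine ⟨pvCmax_base_le .., fun i hi => ?_⟩
      have h1 : (fun q' => if k ≤ (q' : Int) then pvF nums i (q' : Int) else 0) q
          ≤ pvMx k (nums.length + 1) (pvF nums i) := pvCmax_le_of_mem _ _ _ hq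
      simp only [if_pos (show k ≤ (q:Int) by omega)] at h1
      have h2 : pvMx k (nums.length + 1) (pvF nums i) ≤ pvS nums k nums.length :=
        pvCmax_le_of_mem _ _ _ hi
      omega
    · rw [if_neg hg]
      exact pvCmax_base_le ..

-- ---------- A computes (·, pvS) ----------

-- named copies of A's three loop bodies (definitionally equal to the lambdas in `solve`)
def pvInnerA (k : Int) (i j : Nat) (odd : Int) (st : List (PySem.Dict Int Int) × Int) (p : Int) :
    List (PySem.Dict Int Int) × Int :=
  let dp := st.1
  let soln := st.2
  let v := (dp.getD j PySem.Dict.empty).getD p 0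
  let di := dp.getD i PySem.Dict.empty
  let di := di.insert (p + odd) (max (di.getD (p + odd) 0) (v + 1))
  let dp := dp.set i di
  let soln := if p + odd ≥ k then max soln ((dp.getD i PySem.Dict.empty).getD (p + odd) 0) else soln
  (dp, soln)

def pvMidA (k : Int) (i : Nat) (xi odd : Int) (st : List (PySem.Dict Int Int) × Int)
    (em : Int × Int) : List (PySem.Dict Int Int) × Int :=
  let dp := st.1
  let soln := st.2
  let j := em.1
  let m := em.2
  if m < xi then
    ((dp.getD j.toNat PySem.Dict.empty).keys).foldl (pvInnerA k i j.toNat odd) (dp, soln)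
  else (dp, soln)

def pvOuterA (nums : List Int) (k : Int) (st : List (PySem.Dict Int Int) × Int)
    (en : Int × Int) : List (PySem.Dict Int Int) × Int :=
  let dp := st.1
  let soln := st.2
  let i := en.1
  let n := en.2
  let odd := PySem.Int.mod n 2
  let di := dp.getD i.toNat PySem.Dict.empty
  let di := di.insert odd (max (di.getD odd 0) 1)
  let dp := dp.set i.toNat di
  let soln := if odd ≥ k then max soln ((dp.getD i.toNat PySem.Dict.empty).getD odd 0) else soln
  (PySem.List.enumerate (PySem.List.slice nums none (some i))).foldl (pvMidA k i.toNat n odd) (dp, soln)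

theorem solve_eq_foldA (nums : List Int) (k : Int) :
    solve nums k
      = ((PySem.List.enumerate nums).foldl (pvOuterA nums k)
          (nums.map (fun _ => PySem.Dict.empty), 0)).2 := rfl

theorem pvGetD_set_self {α : Type} (l : List α) (i : Nat) (a d : α) (h : i < l.length) :
    (l.set i a).getD i d = a := by
  rw [List.getD_eq_getElem?_getD, List.getElem?_set_self h]
  rfl

theorem pvGetD_set_ne {α : Type} (l : List α) (i j : Nat) (a d : α) (h : j ≠ i) :
    (l.set i a).getD j d = l.getD j d := by
  rw [List.getD_eq_getElem?_getD, List.getElem?_set_ne (Ne.symm h), List.getD_eq_getElem?_getD]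

theorem pvGetD_map_const (l : List Int) (j : Nat) :
    (l.map (fun _ => PySem.Dict.empty)).getD j (PySem.Dict.empty : PySem.Dict Int Int)
      = PySem.Dict.empty := by
  by_cases h : j < l.length
  · rw [List.getD_eq_getElem?_getD, List.getElem?_map, List.getElem?_eq_getElem h]
    rfl
  · rw [List.getD_eq_getElem?_getD, List.getElem?_map,
      List.getElem?_eq_none (by omega : l.length ≤ j)]
    rfl

theorem pvMx_zero (k : Int) (R : Nat) : pvMx k R (fun _ => 0) = 0 := by
  apply le_antisymm
  · rw [pvMx, pvCmax_le_iff]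
    exact ⟨le_rfl, fun x _ => by split <;> omega⟩
  · exact pvMx_nonneg ..

-- pointwise effect of one inner key loop
def pvUpd (nums : List Int) (t u : Nat) (g : Int → Int) (ks : List Int) : Int → Int :=
  ks.foldl (fun g p => fun r =>
    if r = p + pvPar nums t then max (g (p + pvPar nums t)) (pvF nums u p + 1) else g r) g

theorem pvUpd_apply (nums : List Int) (t u : Nat) (g : Int → Int) (ks : List Int) (r : Int) :
    pvUpd nums t u g ks r
      = if r - pvPar nums t ∈ ks then
          max (g r) (pvF nums u (r - pvPar nums t) + 1)
        else g r := by
  induction ks generalizing g with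
  | nil => simp [pvUpd]
  | cons p ps ih =>
    rw [show pvUpd nums t u g (p :: ps) = pvUpd nums t u
        (fun r => if r = p + pvPar nums t then max (g (p + pvPar nums t)) (pvF nums u p + 1) else g r)
        ps from rfl, ih]
    by_cases hr : r = p + pvPar nums t
    · have hrp : r - pvPar nums t = p := by omega
      rw [hrp, if_pos (List.mem_cons_self ..), if_pos hr, hr]
      by_cases hmem : p ∈ ps
      · rw [if_pos hmem]
        omega
      · rw [if_neg hmem]
    · have hrp : ¬ (r - pvPar nums t = p) := by omega
      simp only [List.mem_cons, hrp, false_or, if_neg hr]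

theorem pvInnerA_fold (nums : List Int) (k : Int) (t u : Nat) (hu : u < t) (ht : t < nums.length)
    (ks : List Int) (dp : List (PySem.Dict Int Int)) (soln S0 : Int) (g : Int → Int)
    (hlen : dp.length = nums.length)
    (hdu : pvDFun (dp.getD u PySem.Dict.empty) (pvF nums u))
    (hks : ∀ p ∈ ks, 0 < pvF nums u p)
    (hdt : pvDFun (dp.getD t PySem.Dict.empty) g)
    (hg0 : ∀ r, 0 ≤ g r)
    (hsoln : soln = max S0 (pvMx k (nums.length + 1) g)) :
    ∃ dp', ks.foldl (pvInnerA k t u (pvPar nums t)) (dp, soln)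
        = (dp', max S0 (pvMx k (nums.length + 1) (pvUpd nums t u g ks)))
      ∧ dp'.length = nums.length
      ∧ (∀ j, j ≠ t → dp'.getD j PySem.Dict.empty = dp.getD j PySem.Dict.empty)
      ∧ pvDFun (dp'.getD t PySem.Dict.empty) (pvUpd nums t u g ks)
      ∧ (∀ r, 0 ≤ pvUpd nums t u g ks r) := by
  induction ks generalizing dp soln g with
  | nil =>
    refine ⟨dp, ?_, hlen, fun j _ => rfl, hdt, hg0⟩
    rw [List.foldl_nil, hsoln]
    rfl
  | cons p ps ih =>
    rw [List.foldl_cons]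
    -- one step of the inner loop
    set odd := pvPar nums t with hodd
    have hFp : 0 < pvF nums u p := hks p (List.mem_cons_self ..)
    have hpb := pvF_pos_bounds nums u p hFp
    have hoddb : odd = 0 ∨ odd = 1 := pvPar_mem nums t
    have hv : (dp.getD u PySem.Dict.empty).getD p 0 = pvF nums u p := hdu.1 p
    set q := p + odd with hq
    set v' := max (g q) (pvF nums u p + 1) with hv'
    have hstep : pvInnerA k t u odd (dp, soln) p
        = (dp.set t ((dp.getD t PySem.Dict.empty).insert q v'),
           if q ≥ k then max soln v' else soln) := by
      unfold pvInnerA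
      simp only []
      rw [hv, hdt.1 q, pvGetD_set_self _ _ _ _ (by omega), PySem.Dict.getD_insert_self]
    rw [hstep]
    -- the updated dict and its function
    set g1 : Int → Int := fun r => if r = q then v' else g r with hg1
    set dp1 := dp.set t ((dp.getD t PySem.Dict.empty).insert q v') with hdp1
    have hlen1 : dp1.length = nums.length := by rw [hdp1, List.length_set]; exact hlen
    have hne1 : ∀ j, j ≠ t → dp1.getD j PySem.Dict.empty = dp.getD j PySem.Dict.empty :=
      fun j hj => pvGetD_set_ne _ _ _ _ _ hj
    have hdt1 : pvDFun (dp1.getD t PySem.Dict.empty) g1 := by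
      rw [hdp1, pvGetD_set_self _ _ _ _ (by omega)]
      constructor
      · intro r
        rw [PySem.Dict.getD_insert]
        exact (hdt.1 r) ▸ rfl
      · intro r
        rw [PySem.Dict.contains_insert]
        simp only [hg1, Bool.or_eq_true, beq_iff_eq]
        constructor
        · rintro (h | h)
          · rw [if_pos h]; omega
          · have := (hdt.2 r).mp h
            by_cases hrq : r = q
            · rw [if_pos hrq]; omega
            · rw [if_neg hrq]; omega
        · intro h
          by_cases hrq : r = q
          · exact Or.inl hrq
          · rw [if_neg hrq] at h
            exact Or.inr ((hdt.2 r).mpr h)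
    have hg10 : ∀ r, 0 ≤ g1 r := by
      intro r
      simp only [hg1]
      split
      · have := hg0 q; omega
      · exact hg0 r
    have hsoln1 : (if q ≥ k then max soln v' else soln) = max S0 (pvMx k (nums.length + 1) g1) := by
      have hMx := pvMx_update k (nums.length + 1) g q v' (by omega)
        (by push_cast; omega) (by omega)
      rw [show (fun r => if r = q then v' else g r) = g1 from rfl] at hMx
      by_cases hqk : q ≥ k
      · rw [if_pos hqk, hMx, if_pos hqk, hsoln]
        omega
      · rw [if_neg hqk, hMx, if_neg hqk, hsoln]
    have hdu1 : pvDFun (dp1.getD u PySem.Dict.empty) (pvF nums u) := by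
      rw [hne1 u (by omega)]; exact hdu
    obtain ⟨dp', heq, hl', hne', hdt', hg'⟩ :=
      ih dp1 (if q ≥ k then max soln v' else soln) g1 hlen1 hdu1
        (fun p hp => hks p (List.mem_cons_of_mem _ hp)) hdt1 hg10 hsoln1
    refine ⟨dp', ?_, hl', fun j hj => (hne' j hj).trans (hne1 j hj), ?_, ?_⟩
    · rw [heq]
      rfl
    · exact hdt'
    · exact hg'

theorem pvMidA_fold (nums : List Int) (k : Int) (t : Nat) (ht : t < nums.length)
    (dp : List (PySem.Dict Int Int)) (soln S0 : Int)
    (hlen : dp.length = nums.length)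
    (hdlow : ∀ j, j < t → pvDFun (dp.getD j PySem.Dict.empty) (pvF nums j))
    (hdt : pvDFun (dp.getD t PySem.Dict.empty) (fun q => pvG nums t 0 q))
    (hsoln : soln = max S0 (pvMx k (nums.length + 1) (fun q => pvG nums t 0 q))) :
    ∃ dp', (PySem.List.enumerate (nums.take t)).foldl
        (pvMidA k t (nums.getD t 0) (pvPar nums t)) (dp, soln)
        = (dp', max S0 (pvMx k (nums.length + 1) (fun q => pvG nums t t q)))
      ∧ dp'.length = nums.length
      ∧ (∀ j, j ≠ t → dp'.getD j PySem.Dict.empty = dp.getD j PySem.Dict.empty)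
      ∧ pvDFun (dp'.getD t PySem.Dict.empty) (fun q => pvG nums t t q) := by
  have aux : ∀ u, u ≤ t →
      ∃ dp', (PySem.List.enumerate (nums.take u)).foldl
          (pvMidA k t (nums.getD t 0) (pvPar nums t)) (dp, soln)
          = (dp', max S0 (pvMx k (nums.length + 1) (fun q => pvG nums t u q)))
        ∧ dp'.length = nums.length
        ∧ (∀ j, j ≠ t → dp'.getD j PySem.Dict.empty = dp.getD j PySem.Dict.empty)
        ∧ pvDFun (dp'.getD t PySem.Dict.empty) (fun q => pvG nums t u q) := by
    intro u hu
    induction u with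
    | zero =>
      refine ⟨dp, ?_, hlen, fun j _ => rfl, hdt⟩
      rw [show nums.take 0 = [] from rfl, PySem.List.enumerate_nil, List.foldl_nil, hsoln]
    | succ u ihu =>
      obtain ⟨dp1, heq, hlen1, hne1, hdt1⟩ := ihu (by omega)
      have hul : u < nums.length := by omega
      have htake : nums.take (u + 1) = nums.take u ++ [nums.getD u 0] := by
        rw [List.take_add_one, List.getElem?_eq_getElem hul, List.getD_eq_getElem nums 0 hul]
        rfl
      rw [htake, PySem.List.enumerate_append, List.foldl_append, heq]
      have hlentake : ((nums.take u).length : Int) = (u : Int) := by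
        simp [Nat.min_eq_left (le_of_lt hul)]
      rw [show PySem.List.enumerate [nums.getD u 0] (0 + (nums.take u).length)
          = [((u : Int), nums.getD u 0)] by
        rw [PySem.List.enumerate_cons, PySem.List.enumerate_nil, hlentake, zero_add]]
      rw [List.foldl_cons, List.foldl_nil]
      unfold pvMidA
      simp only [Int.toNat_natCast]
      by_cases hlt : nums.getD u 0 < nums.getD t 0
      · rw [if_pos hlt]
        have hdu1 : pvDFun (dp1.getD u PySem.Dict.empty) (pvF nums u) := by
          rw [hne1 u (by omega)]
          exact hdlow u (by omega)
        have hks : ∀ p ∈ (dp1.getD u PySem.Dict.empty).keys, 0 < pvF nums u p := by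
          intro p hp
          exact (hdu1.2 p).mp ((PySem.Dict.contains_iff_mem_keys _ p).mpr hp)
        obtain ⟨dp', heq', hl', hne', hdt', _⟩ :=
          pvInnerA_fold nums k t u (by omega) ht (dp1.getD u PySem.Dict.empty).keys dp1 _ _ _
            hlen1 hdu1 hks hdt1 (fun r => pvG_nonneg nums t u r) rfl
        have hupd : pvUpd nums t u (fun q => pvG nums t u q) (dp1.getD u PySem.Dict.empty).keys
            = (fun q => pvG nums t (u + 1) q) := by
          funext r
          rw [pvUpd_apply, pvG_succ]
          unfold pvStep
          have hmemiff : r - pvPar nums t ∈ (dp1.getD u PySem.Dict.empty).keys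
              ↔ 0 < pvF nums u (r - pvPar nums t) := by
            rw [← PySem.Dict.contains_iff_mem_keys]
            exact hdu1.2 _
          by_cases hs : 0 < pvF nums u (r - pvPar nums t)
          · rw [if_pos (hmemiff.mpr hs)]
            split_ifs with hc <;> omega
          · rw [if_neg (fun hmem => hs (hmemiff.mp hmem)), if_neg (by tauto)]
        refine ⟨dp', ?_, hl', fun j hj => (hne' j hj).trans (hne1 j hj), ?_⟩
        · rw [heq', hupd]
        · rw [← hupd]
          exact hdt'
      · rw [if_neg hlt]
        have hg : (fun q => pvG nums t u q) = (fun q => pvG nums t (u + 1) q) := by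
          funext r
          rw [pvG_succ]
          unfold pvStep
          rw [if_neg (by tauto)]
        refine ⟨dp1, ?_, hlen1, hne1, ?_⟩
        · rw [← hg]
        · rw [← hg]
          exact hdt1
  exact aux t le_rfl

-- the constant-zero dict function
def g0 : Int → Int := fun _ => 0

theorem pvMx_g0 (k : Int) (R : Nat) : pvMx k R g0 = 0 := pvMx_zero k R

theorem pvOuterA_fold (nums : List Int) (k : Int) : ∀ t, t ≤ nums.length →
    ∃ dp, (PySem.List.enumerate (nums.take t)).foldl (pvOuterA nums k)
        (nums.map (fun _ => PySem.Dict.empty), 0) = (dp, pvS nums k t)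
      ∧ dp.length = nums.length
      ∧ (∀ j, j < t → pvDFun (dp.getD j PySem.Dict.empty) (pvF nums j))
      ∧ (∀ j, t ≤ j → dp.getD j PySem.Dict.empty = PySem.Dict.empty) := by
  intro t
  induction t with
  | zero =>
    intro _
    refine ⟨nums.map (fun _ => PySem.Dict.empty), ?_, by simp, fun j hj => absurd hj (by omega),
      fun j _ => pvGetD_map_const nums j⟩
    rw [show nums.take 0 = [] from rfl, PySem.List.enumerate_nil, List.foldl_nil]
    rfl
  | succ t ih =>
    intro ht
    have htl : t < nums.length := by omega
    obtain ⟨dp, heq, hlen, hlow, hhi⟩ := ih (by omega)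
    have htake : nums.take (t + 1) = nums.take t ++ [nums.getD t 0] := by
      rw [List.take_add_one, List.getElem?_eq_getElem htl, List.getD_eq_getElem nums 0 htl]
      rfl
    have hlentake : ((nums.take t).length : Int) = (t : Int) := by
      simp [Nat.min_eq_left (le_of_lt htl)]
    rw [htake, PySem.List.enumerate_append, List.foldl_append, heq,
      show PySem.List.enumerate [nums.getD t 0] (0 + (nums.take t).length)
          = [((t : Int), nums.getD t 0)] by
        rw [PySem.List.enumerate_cons, PySem.List.enumerate_nil, hlentake, zero_add],
      List.foldl_cons, List.foldl_nil]
    unfold pvOuterA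
    simp only [Int.toNat_natCast]
    have hpar : PySem.Int.mod (nums.getD t 0) 2 = pvPar nums t := rfl
    have hparb := pvPar_mem nums t
    rw [hpar, hhi t le_rfl, PySem.Dict.getD_empty, show max (0 : Int) 1 = 1 by omega]
    set d1 := (PySem.Dict.empty : PySem.Dict Int Int).insert (pvPar nums t) 1 with hd1
    set dp1 := dp.set t d1 with hdp1
    have hget1 : dp1.getD t PySem.Dict.empty = d1 := pvGetD_set_self _ _ _ _ (by omega)
    rw [hget1, PySem.Dict.getD_insert_self]
    have hlen1 : dp1.length = nums.length := by rw [hdp1, List.length_set]; exact hlen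
    have hdt1 : pvDFun (dp1.getD t PySem.Dict.empty) (fun q => pvG nums t 0 q) := by
      rw [hget1]
      have hbase : ∀ q : Int, pvG nums t 0 q = if q = pvPar nums t then 1 else 0 := fun _ => rfl
      constructor
      · intro q
        beta_reduce
        rw [PySem.Dict.getD_insert, hbase q, PySem.Dict.getD_empty]
      · intro q
        beta_reduce
        rw [PySem.Dict.contains_insert, PySem.Dict.contains_empty, hbase q]
        simp only [Bool.or_false, beq_iff_eq]
        split
        · simp_all
        · simp_all
    have hMx : pvMx k (nums.length + 1) (fun q => pvG nums t 0 q)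
        = if k ≤ pvPar nums t then 1 else 0 := by
      have hfun : (fun q : Int => pvG nums t 0 q)
          = (fun r : Int => if r = pvPar nums t then 1 else g0 r) := by
        funext q
        rfl
      rw [hfun, pvMx_update k (nums.length + 1) g0 (pvPar nums t) 1 (by omega)
        (by push_cast; omega) (by unfold g0; omega), pvMx_g0]
      split <;> omega
    have hS0 : 0 ≤ pvS nums k t := pvCmax_base_le ..
    have hsoln1 : (if pvPar nums t ≥ k then max (pvS nums k t) 1 else pvS nums k t)
        = max (pvS nums k t) (pvMx k (nums.length + 1) (fun q => pvG nums t 0 q)) := by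
      rw [hMx]
      by_cases hpk : pvPar nums t ≥ k
      · rw [if_pos hpk, if_pos (by omega)]
      · rw [if_neg hpk, if_neg (by omega)]
        omega
    rw [hsoln1, PySem.List.slice_to_natCast nums t]
    have hdlow1 : ∀ j, j < t → pvDFun (dp1.getD j PySem.Dict.empty) (pvF nums j) := by
      intro j hj
      rw [hdp1, pvGetD_set_ne _ _ _ _ _ (by omega)]
      exact hlow j hj
    obtain ⟨dp', heq', hlen', hne', hdt'⟩ :=
      pvMidA_fold nums k t htl dp1 _ (pvS nums k t) hlen1 hdlow1 hdt1 rfl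
    have hft : (fun q : Int => pvG nums t t q) = pvF nums t :=
      funext fun q => (pvF_eq nums t q).symm
    have hpS : pvS nums k (t + 1) = max (pvS nums k t) (pvMx k (nums.length + 1) (pvF nums t)) := by
      unfold pvS
      rw [List.range_succ, pvCmax_append_singleton]
    refine ⟨dp', ?_, hlen', ?_, ?_⟩
    · rw [heq', hft, hpS]
    · intro j hj
      by_cases hjt : j = t
      · subst hjt
        rw [← hft]
        exact hdt'
      · rw [hne' j hjt, hdp1, pvGetD_set_ne _ _ _ _ _ hjt]
        exact hlow j (by omega)
    · intro j hj
      rw [hne' j (by omega), hdp1, pvGetD_set_ne _ _ _ _ _ (by omega)]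
      exact hhi j (by omega)

theorem solveA_eq (nums : List Int) (k : Int) : solve nums k = pvS nums k nums.length := by
  rw [solve_eq_foldA]
  obtain ⟨dp, heq, -, -, -⟩ := pvOuterA_fold nums k nums.length le_rfl
  rw [List.take_length] at heq
  rw [heq]

-- ---------- B computes pvB ----------

-- one layer of B builds exactly the values pvF · p
theorem pvCur (nums : List Int) (p : Int) :
    nums.foldl
      (fun (cur : List Int) x =>
        cur ++ [(nums.zip (if PySem.Int.mod x 2 == 0 then cur
            else ((List.range nums.length).map (fun j => pvF nums j (p - 1))).take cur.length)).foldl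
          (fun b ys => if ys.1 < x ∧ ys.2 > 0 ∧ ys.2 + 1 > b then ys.2 + 1 else b)
          (if p == PySem.Int.mod x 2 then 1 else 0)]) []
    = (List.range nums.length).map (fun i => pvF nums i p) := by
  have aux : ∀ t, t ≤ nums.length →
      (nums.take t).foldl
        (fun (cur : List Int) x =>
          cur ++ [(nums.zip (if PySem.Int.mod x 2 == 0 then cur
              else ((List.range nums.length).map (fun j => pvF nums j (p - 1))).take cur.length)).foldl
            (fun b ys => if ys.1 < x ∧ ys.2 > 0 ∧ ys.2 + 1 > b then ys.2 + 1 else b)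
            (if p == PySem.Int.mod x 2 then 1 else 0)]) []
      = (List.range t).map (fun i => pvF nums i p) := by
    intro t ht
    induction t with
    | zero => simp
    | succ t ih =>
      have htl : t < nums.length := by omega
      rw [List.take_add_one, List.foldl_append, ih (by omega)]
      have hx : nums[t]?.toList = [nums.getD t 0] := by
        rw [List.getElem?_eq_getElem htl, List.getD_eq_getElem nums 0 htl]
        rfl
      rw [hx]
      simp only [List.foldl_cons, List.foldl_nil]
      -- evaluate the body at x = nums[t], cur = (range t).map (pvF · p)
      have hlen : ((List.range t).map (fun i => pvF nums i p)).length = t := by simp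
      have hpar : PySem.Int.mod (nums.getD t 0) 2 = pvPar nums t := rfl
      have hsrc : (if PySem.Int.mod (nums.getD t 0) 2 == 0 then (List.range t).map (fun i => pvF nums i p)
            else ((List.range nums.length).map (fun j => pvF nums j (p - 1))).take
              ((List.range t).map (fun i => pvF nums i p)).length)
          = (List.range t).map (fun j => pvF nums j (p - pvPar nums t)) := by
        rw [hlen, ← List.map_take, List.take_range, Nat.min_eq_left (le_of_lt htl)]
        rcases pvPar_mem nums t with h0 | h1
        · rw [hpar, h0]
          simp only [beq_self_eq_true, if_true, sub_zero]
        · rw [hpar, h1]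
          norm_num
      rw [hsrc, pvZip nums t _ (le_of_lt htl), List.foldl_map]
      have hbase : (if p == PySem.Int.mod (nums.getD t 0) 2 then (1:Int) else 0)
          = (if p = pvPar nums t then 1 else 0) := by
        rw [hpar]
        by_cases h : p = pvPar nums t
        · simp [h]
        · simp [h]
      rw [hbase]
      have hfold : ((List.range t).foldl
            (fun b j => if (nums.getD j 0, pvF nums j (p - pvPar nums t)).1 < nums.getD t 0 ∧
                (nums.getD j 0, pvF nums j (p - pvPar nums t)).2 > 0 ∧
                (nums.getD j 0, pvF nums j (p - pvPar nums t)).2 + 1 > b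
              then (nums.getD j 0, pvF nums j (p - pvPar nums t)).2 + 1 else b)
            (if p = pvPar nums t then 1 else 0))
          = pvG nums t t p := rfl
      rw [hfold, ← pvF_eq, List.range_succ, List.map_append]
      rfl
  have := aux nums.length le_rfl
  rwa [List.take_length] at this

theorem solveB_eq (nums : List Int) (k : Int) : solve_alt nums k = pvB nums k (nums.length + 1) := by
  unfold solve_alt
  simp only []
  have main : ∀ P : Nat, P ≤ nums.length + 1 →
      (PySem.List.pyRange 0 ((P : Nat) : Int) 1).foldl
        (fun (st : List Int × Int) p =>
          (nums.foldl (fun (cur : List Int) x =>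
              cur ++ [(nums.zip (if PySem.Int.mod x 2 == 0 then cur else st.1.take cur.length)).foldl
                (fun b ys => if ys.1 < x ∧ ys.2 > 0 ∧ ys.2 + 1 > b then ys.2 + 1 else b)
                (if p == PySem.Int.mod x 2 then 1 else 0)]) [],
           if p ≥ max k 0 then
              (nums.foldl (fun (cur : List Int) x =>
                cur ++ [(nums.zip (if PySem.Int.mod x 2 == 0 then cur else st.1.take cur.length)).foldl
                  (fun b ys => if ys.1 < x ∧ ys.2 > 0 ∧ ys.2 + 1 > b then ys.2 + 1 else b)
                  (if p == PySem.Int.mod x 2 then 1 else 0)]) []).foldl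
                (fun best b => if b > best then b else best) st.2
            else st.2))
        (List.replicate nums.length 0, 0)
      = ((List.range nums.length).map (fun j => pvF nums j ((P : Int) - 1)), pvB nums k P) := by
    intro P hP
    induction P with
    | zero =>
      rw [show ((0 : Nat) : Int) = 0 by rfl, PySem.List.pyRange_one_eq_nil le_rfl, List.foldl_nil]
      rw [Prod.mk.injEq]
      constructor
      · apply List.ext_getElem
        · simp
        · intro j h1 h2
          simp only [List.getElem_replicate, List.getElem_map, List.getElem_range]
          rw [pvF_of_neg nums j _ (by omega)]
      · rfl
    | succ P ih =>
      rw [show (((P + 1 : Nat)) : Int) = ((P : Nat) : Int) + 1 by push_cast; ring,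
        PySem.List.pyRange_one_succ_right (by positivity), List.foldl_append, ih (by omega),
        List.foldl_cons, List.foldl_nil]
      simp only []
      rw [show ((P : Nat) : Int) + 1 - 1 = ((P : Nat) : Int) by ring]
      rw [pvCur nums ((P : Nat) : Int)]
      rw [Prod.mk.injEq]
      constructor
      · rfl
      · -- the best accumulator
        have hmaxf : (fun (best b : Int) => if b > best then b else best) = (fun a b => max a b) := by
          funext a b
          simp only [gt_iff_lt, Int.max_def]
          split <;> split <;> omega
        have hB0 : 0 ≤ pvB nums k P := pvCmax_base_le ..
        have hstep : pvB nums k (P + 1)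
            = max (pvB nums k P) (if max k 0 ≤ ((P : Nat) : Int) then pvT nums ((P : Nat) : Int) else 0) := by
          unfold pvB
          rw [List.range_succ, pvCmax_append_singleton]
        by_cases hg : ((P : Nat) : Int) ≥ max k 0
        · rw [if_pos hg, hmaxf, List.foldl_map]
          rw [show ((List.range nums.length).foldl (fun (a : Int) (i : Nat) => max a (pvF nums i ((P : Nat) : Int)))
              (pvB nums k P)) = pvCmax (List.range nums.length) (fun i => pvF nums i ((P : Nat) : Int)) (pvB nums k P) from rfl]
          rw [pvCmax_seed _ _ _ hB0, hstep, if_pos hg]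
          rfl
        · rw [if_neg hg, hstep, if_neg (by omega)]
          omega
  have := main (nums.length + 1) le_rfl
  rw [show (((nums.length + 1 : Nat)) : Int) = ((nums.length : Nat) : Int) + 1 by push_cast; ring] at this
  rw [this]

-- ===== VERDICT (by name: the statement is the Claim_ definition above) =====
theorem solve_spec : Claim_equal_solve := by
  intro nums k _
  unfold Spec_solve
  rw [solveA_eq, solveB_eq, pvS_eq_pvB]
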